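-- pv_equiv track=rewrite | github.com/DTDevelop/ProjectEuler | Problems11-20/Problem11.py | greatest_product_of_column
-- ===== SOURCE A (Python) =====
-- def greatest_product_of_column(matrix, adjacent):
--     """
--     given matrix and number of adjacent
--     return greatest product of column
--     """
--     greatest_product = 0
--
--     matrix_length = len(matrix)
--
--     for row in range(matrix_length):
--         for num in range(matrix_length): # relative number to compare
--             if num + adjacent > matrix_length: # not enough values in direction to compare
--                 break # move to next column
--             new_product = 1
--             for inc in range(adjacent): # calculating product
--                 new_product *= matrix[num+inc][row]
--             if new_product > greatest_product:
--                 greatest_product = new_product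
--
--     return greatest_product
-- ===== SOURCE B (Python) =====
-- def greatest_product_of_column(matrix, adjacent):
--     """
--     given matrix and number of adjacent
--     return greatest product of column
--     """
--     n = len(matrix)
--     if adjacent > n:
--         return 0
--     if adjacent <= 0:
--         # each position hosts an empty window whose product is 1
--         return 1 if n > 0 else 0
--     best = 0
--     for col in range(n):
--         prod = 1      # product of the NONZERO entries of the current window
--         zeros = 0     # number of zero entries of the current window
--         for i in range(n):
--             v = matrix[i][col]
--             if v == 0:
--                 zeros += 1
--             else:
--                 prod *= v
--             if i >= adjacent:
--                 u = matrix[i - adjacent][col]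
--                 if u == 0:
--                     zeros -= 1
--                 else:
--                     prod //= u
--             if i >= adjacent - 1:
--                 window = 0 if zeros > 0 else prod
--                 if window > best:
--                     best = window
--     return best
-- ===== Notes on version B (the rewrite author's own statement) =====
-- stated objective: alternative
-- what changed: Instead of recomputing each window product from scratch, B slides a window down each column keeping a running product of the nonzero entries plus a zero count, updating each candidate product incrementally; measured runtime is comparable to A.
import Mathlib
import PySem

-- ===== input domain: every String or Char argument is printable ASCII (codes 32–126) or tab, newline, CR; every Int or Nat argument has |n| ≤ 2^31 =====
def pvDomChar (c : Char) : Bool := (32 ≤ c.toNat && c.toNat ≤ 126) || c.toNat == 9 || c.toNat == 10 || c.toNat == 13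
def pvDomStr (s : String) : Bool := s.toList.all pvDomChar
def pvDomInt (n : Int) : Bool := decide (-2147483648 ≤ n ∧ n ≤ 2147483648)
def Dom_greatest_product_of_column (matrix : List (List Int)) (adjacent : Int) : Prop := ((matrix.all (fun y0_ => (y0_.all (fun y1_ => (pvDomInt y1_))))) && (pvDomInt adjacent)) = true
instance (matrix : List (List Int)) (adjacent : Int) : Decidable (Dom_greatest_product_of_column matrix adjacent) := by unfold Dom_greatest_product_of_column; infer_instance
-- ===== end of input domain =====

-- B replaces A's per-window product recomputation by a per-column sliding window that keeps a
-- running product of the nonzero entries plus a zero count (objective: alternative algorithm).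

-- matrix[i][j]; in-range under Pre_
def pvAt (matrix : List (List Int)) (i j : Int) : Int :=
  PySem.List.pyGetD (PySem.List.pyGetD matrix i []) j 0

-- ===== PORT A =====
-- the 'for num in range(matrix_length)' loop with its 'break'
def pvANumLoop (matrix : List (List Int)) (adjacent n row : Int) : List Int → Int → Int
  | [], g => g
  | num :: rest, g =>
    if num + adjacent > n then g
    else
      let newProduct := (PySem.List.pyRange 0 adjacent 1).foldl
        (fun acc inc => acc * pvAt matrix (num + inc) row) 1
      pvANumLoop matrix adjacent n row rest (if newProduct > g then newProduct else g)

def greatest_product_of_column (matrix : List (List Int)) (adjacent : Int) : Int :=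
  let n : Int := PySem.List.len matrix
  (PySem.List.pyRange 0 n 1).foldl
    (fun g row => pvANumLoop matrix adjacent n row (PySem.List.pyRange 0 n 1) g) 0

-- ===== PORT B =====
-- one step of B's inner loop: state = (prod of nonzero window entries, zero count, best)
def pvBStep (matrix : List (List Int)) (adjacent col : Int) (st : Int × Int × Int) (i : Int) :
    Int × Int × Int :=
  let v := pvAt matrix i col
  let p1 := if v = 0 then st.1 else st.1 * v
  let z1 := if v = 0 then st.2.1 + 1 else st.2.1
  let pz :=
    if adjacent ≤ i then
      let u := pvAt matrix (i - adjacent) col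
      if u = 0 then (p1, z1 - 1) else (PySem.Int.floordiv p1 u, z1)
    else (p1, z1)
  let best :=
    if adjacent - 1 ≤ i then
      let window := if 0 < pz.2 then 0 else pz.1
      if window > st.2.2 then window else st.2.2
    else st.2.2
  (pz.1, pz.2, best)

def greatest_product_of_column_alt (matrix : List (List Int)) (adjacent : Int) : Int :=
  let n : Int := PySem.List.len matrix
  if adjacent > n then 0
  else if adjacent ≤ 0 then (if 0 < n then 1 else 0)
  else
    (PySem.List.pyRange 0 n 1).foldl
      (fun best col =>
        ((PySem.List.pyRange 0 n 1).foldl (pvBStep matrix adjacent col) (1, 0, best)).2.2) 0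

-- ===== PRECONDITION & SPEC =====
-- Pre_ excludes exactly the inputs where Python A raises IndexError: when 1 ≤ adjacent ≤ len(matrix),
-- A reads matrix[k][row] for all k, row < len(matrix), so every row must have length ≥ len(matrix).
def Pre_greatest_product_of_column (matrix : List (List Int)) (adjacent : Int) : Prop :=
  (1 ≤ adjacent ∧ adjacent ≤ (matrix.length : Int)) → ∀ r ∈ matrix, matrix.length ≤ r.length
instance (matrix : List (List Int)) (adjacent : Int) :
    Decidable (Pre_greatest_product_of_column matrix adjacent) := by
  unfold Pre_greatest_product_of_column; infer_instance

def pvWitness_greatest_product_of_column : List (List Int) × Int := ([[1, 2], [3, 4]], 2)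

def Spec_greatest_product_of_column (matrix : List (List Int)) (adjacent : Int) (out : Int) : Prop := out = greatest_product_of_column_alt matrix adjacent
instance (matrix : List (List Int)) (adjacent : Int) (out : Int) : Decidable (Spec_greatest_product_of_column matrix adjacent out) := by unfold Spec_greatest_product_of_column; infer_instance

-- ===== CLAIM (what is proved, stated in full; the proofs are below) =====
def Claim_equal_greatest_product_of_column : Prop := ∀ (matrix : List (List Int)) (adjacent : Int), Dom_greatest_product_of_column matrix adjacent → Pre_greatest_product_of_column matrix adjacent → Spec_greatest_product_of_column matrix adjacent (greatest_product_of_column matrix adjacent)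

-- ===== LEMMAS AND PROOFS =====

-- 'if v > g then v else g'
def pvUpd (g v : Int) : Int := if v > g then v else g

-- the column segment [lo, hi) read through accessor c, and its plain product
def pvSeg (c : Int → Int) (lo hi : Int) : List Int := (PySem.List.pyRange lo hi 1).map c

def pvSegProd (c : Int → Int) (lo hi : Int) : Int := (pvSeg c lo hi).prod

-- product of the nonzero entries of the segment
def pvNZ (c : Int → Int) (lo hi : Int) : Int :=
  ((pvSeg c lo hi).filter (fun x => decide (x ≠ 0))).prod

-- zero count of the segment, as Int
def pvZC (c : Int → Int) (lo hi : Int) : Int := ((pvSeg c lo hi).count 0 : Int)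

-- per-column specification: fold pvUpd over the window products, windows starting at 0 .. n-adjacent
def pvSpecCol (c : Int → Int) (a n g : Int) : Int :=
  (PySem.List.pyRange 0 (n - a + 1) 1).foldl (fun g s => pvUpd g (pvSegProd c s (s + a))) g

-- B's best accumulator after the first t steps of the inner loop
def pvBfold (c : Int → Int) (a g t : Int) : Int :=
  (PySem.List.pyRange 0 (t - a + 1) 1).foldl (fun g s => pvUpd g (pvSegProd c s (s + a))) g

-- pvBStep with the column accessor abstracted (pvBStep matrix a col = pvBStepC (fun i => pvAt matrix i col) a)
def pvBStepC (c : Int → Int) (adjacent : Int) (st : Int × Int × Int) (i : Int) :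
    Int × Int × Int :=
  let v := c i
  let p1 := if v = 0 then st.1 else st.1 * v
  let z1 := if v = 0 then st.2.1 + 1 else st.2.1
  let pz :=
    if adjacent ≤ i then
      let u := c (i - adjacent)
      if u = 0 then (p1, z1 - 1) else (PySem.Int.floordiv p1 u, z1)
    else (p1, z1)
  let best :=
    if adjacent - 1 ≤ i then
      let window := if 0 < pz.2 then 0 else pz.1
      if window > st.2.2 then window else st.2.2
    else st.2.2
  (pz.1, pz.2, best)

lemma pvBStep_eq_pvBStepC (matrix : List (List Int)) (a col : Int) :
    pvBStep matrix a col = pvBStepC (fun i => pvAt matrix i col) a := rfl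

lemma pvInnerProdA (matrix : List (List Int)) (row a num : Int) :
    (PySem.List.pyRange 0 a 1).foldl (fun acc inc => acc * pvAt matrix (num + inc) row) 1 =
      pvSegProd (fun i => pvAt matrix i row) num (num + a) := by
  simp [pvSegProd, pvSeg, PySem.List.pyRange_one, List.prod_eq_foldl, List.foldl_map]

lemma pvANumLoop_noBreak (matrix : List (List Int)) (a n row : Int) (l : List Int) (l2 : List Int)
    (g : Int) (h : ∀ num ∈ l, num + a ≤ n) :
    pvANumLoop matrix a n row (l ++ l2) g =
      pvANumLoop matrix a n row l2
        (l.foldl (fun g num => pvUpd g (pvSegProd (fun i => pvAt matrix i row) num (num + a))) g) := by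
  induction l generalizing g with
  | nil => rfl
  | cons x xs ih =>
    have hx := h x (by simp)
    simp only [List.cons_append, pvANumLoop, List.foldl_cons]
    rw [if_neg (show ¬ x + a > n by omega), ih _ (fun num hm => h num (by simp [hm])),
      pvInnerProdA matrix row a x]
    rfl

lemma pvACol (matrix : List (List Int)) (a row g : Int) (n : Int)
    (h1 : 1 ≤ a) (h2 : a ≤ n) :
    pvANumLoop matrix a n row (PySem.List.pyRange 0 n 1) g =
      pvSpecCol (fun i => pvAt matrix i row) a n g := by
  rw [PySem.List.pyRange_one_append 0 (n - a + 1) n (by omega) (by omega)]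
  rw [pvANumLoop_noBreak matrix a n row _ _ g
    (fun num hm => by rw [PySem.List.mem_pyRange_one] at hm; omega)]
  rcases eq_or_lt_of_le (show n - a + 1 ≤ n by omega) with he | hlt
  · rw [show PySem.List.pyRange (n - a + 1) n 1 = [] from by
      rw [he]; exact PySem.List.pyRange_one_eq_nil (le_refl n)]
    rfl
  · rw [PySem.List.pyRange_one_cons hlt]
    simp only [pvANumLoop]
    rw [if_pos (show n - a + 1 + a > n by omega)]
    rfl

lemma pvProdFull (l : List Int) :
    (if 0 < ((l.count 0 : Nat) : Int) then 0 else (l.filter (fun x => decide (x ≠ 0))).prod) = l.prod := by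
  by_cases h : (0:Int) ∈ l
  · rw [if_pos (by exact_mod_cast List.count_pos_iff.mpr h), List.prod_eq_zero h]
  · rw [if_neg (by simp [List.count_eq_zero_of_not_mem h]), List.filter_eq_self.mpr]
    intro x hx; simp; rintro rfl; exact h hx

lemma pvSeg_succ (c : Int → Int) (lo hi : Int) (h : lo ≤ hi) :
    pvSeg c lo (hi + 1) = pvSeg c lo hi ++ [c hi] := by
  simp [pvSeg, PySem.List.pyRange_one_succ_right h]

lemma pvSeg_cons (c : Int → Int) (lo hi : Int) (h : lo < hi) :
    pvSeg c lo hi = c lo :: pvSeg c (lo + 1) hi := by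
  simp [pvSeg, PySem.List.pyRange_one_cons h]

lemma pvNZ_succ (c : Int → Int) (lo hi : Int) (h : lo ≤ hi) :
    pvNZ c lo (hi + 1) = if c hi = 0 then pvNZ c lo hi else pvNZ c lo hi * c hi := by
  rw [pvNZ, pvSeg_succ c lo hi h, List.filter_append, List.prod_append]
  by_cases hv : c hi = 0 <;> simp [hv, pvNZ]

lemma pvZC_succ (c : Int → Int) (lo hi : Int) (h : lo ≤ hi) :
    pvZC c lo (hi + 1) = if c hi = 0 then pvZC c lo hi + 1 else pvZC c lo hi := by
  rw [pvZC, pvSeg_succ c lo hi h, List.count_append]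
  by_cases hv : c hi = 0 <;> simp [hv, pvZC]

lemma pvNZ_cons (c : Int → Int) (lo hi : Int) (h : lo < hi) :
    pvNZ c lo hi = if c lo = 0 then pvNZ c (lo + 1) hi else c lo * pvNZ c (lo + 1) hi := by
  rw [pvNZ, pvSeg_cons c lo hi h]
  by_cases hu : c lo = 0 <;> simp [hu, pvNZ]

lemma pvZC_cons (c : Int → Int) (lo hi : Int) (h : lo < hi) :
    pvZC c lo hi = if c lo = 0 then pvZC c (lo + 1) hi + 1 else pvZC c (lo + 1) hi := by
  rw [pvZC, pvSeg_cons c lo hi h]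
  by_cases hu : c lo = 0 <;> simp [hu, pvZC]

lemma pvSeg_nil (c : Int → Int) (lo hi : Int) (h : hi ≤ lo) : pvSeg c lo hi = [] := by
  rw [pvSeg, PySem.List.pyRange_one_eq_nil h]; rfl

lemma pvBfold_nil (c : Int → Int) (a g t : Int) (h : t - a + 1 ≤ 0) : pvBfold c a g t = g := by
  rw [pvBfold, PySem.List.pyRange_one_eq_nil h, List.foldl_nil]

lemma pvBInv (c : Int → Int) (a g : Int) (h1 : 1 ≤ a) (t : Nat) :
    (PySem.List.pyRange 0 (t : Int) 1).foldl (pvBStepC c a) (1, 0, g) =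
      (pvNZ c (max ((t : Int) - a) 0) t,
       pvZC c (max ((t : Int) - a) 0) t,
       pvBfold c a g t) := by
  induction t with
  | zero =>
    simp only [Nat.cast_zero]
    rw [PySem.List.pyRange_one_eq_nil (le_refl (0:Int)), List.foldl_nil,
      pvBfold_nil c a g 0 (by omega), max_eq_right (show (0:Int) - a ≤ 0 by omega),
      pvNZ, pvZC, pvSeg_nil c 0 0 (le_refl 0)]
    rfl
  | succ t ih =>
    have hcast : ((t + 1 : Nat) : Int) = (t : Int) + 1 := by push_cast; ring
    rw [hcast, PySem.List.pyRange_one_succ_right (by positivity), List.foldl_append,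
      List.foldl_cons, List.foldl_nil, ih]
    have ht0 : (0:Int) ≤ (t:Int) := by positivity
    by_cases ha : a ≤ (t : Int)
    · -- full window slides: remove the left element
      have hlo : max ((t:Int) - a) 0 = (t:Int) - a := max_eq_left (by omega)
      have hlo' : max ((t:Int) + 1 - a) 0 = (t:Int) - a + 1 := by rw [max_eq_left (by omega)]; ring
      -- the grown window [t-a, t+1)
      have hp1 : (if c (t:Int) = 0 then pvNZ c ((t:Int) - a) (t:Int)
            else pvNZ c ((t:Int) - a) (t:Int) * c (t:Int)) = pvNZ c ((t:Int) - a) ((t:Int) + 1) :=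
        (pvNZ_succ c _ _ (by omega)).symm
      have hz1 : (if c (t:Int) = 0 then pvZC c ((t:Int) - a) (t:Int) + 1
            else pvZC c ((t:Int) - a) (t:Int)) = pvZC c ((t:Int) - a) ((t:Int) + 1) :=
        (pvZC_succ c _ _ (by omega)).symm
      have hbf : pvBfold c a g ((t:Int) + 1)
          = pvUpd (pvBfold c a g (t:Int)) (pvSegProd c ((t:Int) - a + 1) ((t:Int) + 1)) := by
        have e1 : (t:Int) + 1 - a + 1 = ((t:Int) - a + 1) + 1 := by ring
        rw [pvBfold, e1, PySem.List.pyRange_one_succ_right (by omega), List.foldl_append,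
          List.foldl_cons, List.foldl_nil, pvBfold]
        have e2 : (t:Int) - a + 1 + a = (t:Int) + 1 := by ring
        rw [e2]
      have hwin : ∀ p z : Int, p = pvNZ c ((t:Int) - a + 1) ((t:Int) + 1) →
          z = pvZC c ((t:Int) - a + 1) ((t:Int) + 1) →
          (if 0 < z then 0 else p) = pvSegProd c ((t:Int) - a + 1) ((t:Int) + 1) := by
        intro p z hp hz
        rw [hp, hz, pvNZ, pvZC, pvSegProd, pvProdFull]
      simp only [pvBStepC, if_pos ha, if_pos (show a - 1 ≤ (t:Int) by omega), hlo, hlo', hp1, hz1, hbf]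
      by_cases hu : c ((t:Int) - a) = 0
      · have hnz := pvNZ_cons c ((t:Int) - a) ((t:Int) + 1) (by omega)
        have hzc := pvZC_cons c ((t:Int) - a) ((t:Int) + 1) (by omega)
        rw [if_pos hu] at hnz hzc
        rw [if_pos hu, hnz, hzc]
        simp only []
        rw [Prod.mk.injEq, Prod.mk.injEq]
        refine ⟨rfl, by omega, ?_⟩
        rw [hwin _ _ rfl (by omega)]
        rfl
      · have hnz := pvNZ_cons c ((t:Int) - a) ((t:Int) + 1) (by omega)
        have hzc := pvZC_cons c ((t:Int) - a) ((t:Int) + 1) (by omega)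
        rw [if_neg hu] at hnz hzc
        rw [if_neg hu, hnz, hzc]
        simp only []
        have hdiv : PySem.Int.floordiv (c ((t:Int) - a) * pvNZ c ((t:Int) - a + 1) ((t:Int) + 1)) (c ((t:Int) - a))
            = pvNZ c ((t:Int) - a + 1) ((t:Int) + 1) := Int.mul_fdiv_cancel_left _ hu
        rw [Prod.mk.injEq, Prod.mk.injEq, hdiv]
        refine ⟨rfl, rfl, ?_⟩
        rw [hwin _ _ rfl rfl]
        rfl
    · -- growing window: no removal yet
      have hlo : max ((t:Int) - a) 0 = 0 := max_eq_right (by omega)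
      have hlo' : max ((t:Int) + 1 - a) 0 = 0 := max_eq_right (by omega)
      have hp1 : (if c (t:Int) = 0 then pvNZ c 0 (t:Int)
            else pvNZ c 0 (t:Int) * c (t:Int)) = pvNZ c 0 ((t:Int) + 1) :=
        (pvNZ_succ c _ _ (by omega)).symm
      have hz1 : (if c (t:Int) = 0 then pvZC c 0 (t:Int) + 1
            else pvZC c 0 (t:Int)) = pvZC c 0 ((t:Int) + 1) :=
        (pvZC_succ c _ _ (by omega)).symm
      simp only [pvBStepC, if_neg ha, hlo, hlo', hp1, hz1]
      by_cases hb : a - 1 ≤ (t:Int)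
      · -- i = a - 1: the first full window [0, a) = [0, t+1)
        have hta : (t:Int) = a - 1 := by omega
        have hbf : pvBfold c a g ((t:Int) + 1)
            = pvUpd (pvBfold c a g (t:Int)) (pvSegProd c 0 ((t:Int) + 1)) := by
          have e1 : (t:Int) + 1 - a + 1 = 1 := by omega
          have e2 : (t:Int) - a + 1 = 0 := by omega
          have hr1 : PySem.List.pyRange 0 1 1 = [0] := by decide
          rw [pvBfold, e1, hr1, List.foldl_cons, List.foldl_nil,
            pvBfold_nil c a g (t:Int) (by omega)]
          have e3 : (0:Int) + a = (t:Int) + 1 := by omega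
          rw [e3]
        rw [if_pos hb, Prod.mk.injEq, Prod.mk.injEq]
        refine ⟨rfl, rfl, ?_⟩
        rw [hbf, show (if 0 < pvZC c 0 ((t:Int)+1) then 0 else pvNZ c 0 ((t:Int)+1))
            = pvSegProd c 0 ((t:Int) + 1) from by rw [pvNZ, pvZC, pvSegProd, pvProdFull]]
        rfl
      · have hbf : pvBfold c a g ((t:Int) + 1) = pvBfold c a g (t:Int) := by
          rw [pvBfold, pvBfold, PySem.List.pyRange_one_eq_nil (by omega),
            PySem.List.pyRange_one_eq_nil (by omega)]
        rw [if_neg hb, Prod.mk.injEq, Prod.mk.injEq]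
        exact ⟨rfl, rfl, hbf.symm⟩

lemma pvSegProd_nil (c : Int → Int) (lo hi : Int) (h : hi ≤ lo) : pvSegProd c lo hi = 1 := by
  rw [pvSegProd, pvSeg_nil c lo hi h]; rfl

-- fold of 'update best with candidate 1'
lemma pvFoldUpd1 (l : List Int) (g : Int) :
    l.foldl (fun g _ => pvUpd g 1) g = if l.isEmpty then g else pvUpd g 1 := by
  induction l generalizing g with
  | nil => rfl
  | cons x xs ih =>
    rw [List.foldl_cons, ih (pvUpd g 1)]
    by_cases h : xs.isEmpty <;> simp only [h, List.isEmpty_cons, if_true, if_false, Bool.false_eq_true]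
    unfold pvUpd; split_ifs <;> omega

lemma pvFoldConst (l : List Int) : l.foldl (fun (g : Int) (_ : Int) => g) 0 = 0 := by
  induction l <;> simp_all

-- ===== VERDICT (by name: the statement is the Claim_ definition above) =====
theorem greatest_product_of_column_spec : Claim_equal_greatest_product_of_column := by
  intro matrix adjacent _hdom _hpre
  unfold Spec_greatest_product_of_column greatest_product_of_column greatest_product_of_column_alt
  simp only [PySem.List.len_eq]
  by_cases h1 : adjacent > (matrix.length : Int)
  · -- every inner loop breaks at num = 0
    rw [if_pos h1]
    rw [PySem.List.foldl_congr_mem _ _ (fun (g : Int) (_ : Int) => g) 0 ?_]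
    · exact pvFoldConst _
    · intro g row hrow
      rcases List.eq_nil_or_concat (PySem.List.pyRange 0 (matrix.length : Int) 1) with hnil | _
      · rw [hnil]; rfl
      · have hmem : (0:Int) ∈ PySem.List.pyRange 0 (matrix.length : Int) 1 := by
          rw [PySem.List.mem_pyRange_one]
          rw [PySem.List.mem_pyRange_one] at hrow
          omega
        rw [PySem.List.pyRange_one_cons (by rw [PySem.List.mem_pyRange_one] at hrow; omega)]
        unfold pvANumLoop
        rw [if_pos (by omega : (0:Int) + adjacent > (matrix.length : Int))]
  · rw [if_neg h1]
    by_cases h2 : adjacent ≤ 0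
    · -- empty windows: every product is 1
      rw [if_pos h2]
      by_cases h3 : (0:Int) < (matrix.length : Int)
      · rw [if_pos h3]
        rw [PySem.List.foldl_congr_mem _ _ (fun (g : Int) (_ : Int) => pvUpd g 1) 0 ?_]
        · rw [pvFoldUpd1]
          rw [if_neg (show ¬ (PySem.List.pyRange 0 (matrix.length : Int) 1).isEmpty = true from by
            rw [List.isEmpty_iff]
            exact List.ne_nil_of_mem (PySem.List.mem_pyRange_one.mpr ⟨le_refl 0, h3⟩))]
          rfl
        · intro g row _
          have hnb := pvANumLoop_noBreak matrix adjacent (matrix.length : Int) row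
            (PySem.List.pyRange 0 (matrix.length : Int) 1) [] g
            (fun num hm => by rw [PySem.List.mem_pyRange_one] at hm; omega)
          rw [List.append_nil] at hnb
          rw [hnb]
          simp only [pvANumLoop]
          rw [PySem.List.foldl_congr_mem _ _ (fun (g : Int) (_ : Int) => pvUpd g 1) g
            (fun acc num _ => by rw [pvSegProd_nil _ _ _ (by omega)]), pvFoldUpd1,
            if_neg (show ¬ (PySem.List.pyRange 0 (matrix.length : Int) 1).isEmpty = true from by
              rw [List.isEmpty_iff]
              exact List.ne_nil_of_mem (PySem.List.mem_pyRange_one.mpr ⟨le_refl 0, h3⟩))]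
      · rw [if_neg h3]
        rw [PySem.List.pyRange_one_eq_nil (by omega), List.foldl_nil]
    · -- the main case: 1 ≤ adjacent ≤ len(matrix)
      rw [if_neg h2]
      apply PySem.List.foldl_congr_mem
      intro g col _
      rw [pvACol matrix adjacent col g (matrix.length : Int) (by omega) (by omega)]
      rw [pvBStep_eq_pvBStepC]
      have hcast : ((matrix.length : Nat) : Int) = (matrix.length : Int) := rfl
      rw [show (matrix.length : Int) = ((matrix.length : Nat) : Int) from rfl] at *
      rw [pvBInv (fun i => pvAt matrix i col) adjacent g (by omega) matrix.length]
      rfl
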